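-- pv_equiv track=rewrite | github.com/Haoran12/RST | backend/app/services/lore_scheduler.py | _cap_candidates_after_expansion
-- ===== SOURCE A (Python) =====
-- MAX_CANDIDATES_AFTER_EXPANSION = 50
--
-- def _cap_candidates_after_expansion(
--
--     constant_ids: list[str],
--     candidate_ids: list[str],
-- ) -> list[str]:
--     if len(candidate_ids) <= MAX_CANDIDATES_AFTER_EXPANSION:
--         return candidate_ids
--
--     constant_set = set(constant_ids)
--     kept_constants = [entry_id for entry_id in candidate_ids if entry_id in constant_set]
--     if len(kept_constants) >= MAX_CANDIDATES_AFTER_EXPANSION: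
--         return kept_constants
--
--     capped = list(kept_constants)
--     cap_size = MAX_CANDIDATES_AFTER_EXPANSION - len(kept_constants)
--     for entry_id in candidate_ids:
--         if entry_id in constant_set:
--             continue
--         capped.append(entry_id)
--         if len(capped) >= len(kept_constants) + cap_size:
--             break
--     return capped
-- ===== SOURCE B (Python) =====
-- MAX_CANDIDATES_AFTER_EXPANSION = 50
--
-- def _cap_candidates_after_expansion(
--     constant_ids: list[str],
--     candidate_ids: list[str],
-- ) -> list[str]:
--     if len(candidate_ids) <= MAX_CANDIDATES_AFTER_EXPANSION:
--         return candidate_ids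
--     constant_set = set(constant_ids)
--     # Stable sort on a boolean key: constants first, non-constants after,
--     # each group keeping its original candidate order.
--     ordered = sorted(candidate_ids, key=lambda e: e not in constant_set)
--     k = sum(e in constant_set for e in candidate_ids)
--     return ordered[:max(k, MAX_CANDIDATES_AFTER_EXPANSION)]
-- ===== Notes on version B (the rewrite author's own statement) =====
-- stated objective: alternative
-- what changed: Replaces A's filter-comprehension plus append-and-break loop with a stable sort on the boolean key 'not a constant' (constants float to the front, each group keeping candidate order), a counting pass, and one slice ordered[:max(k, 50)].
import Mathlib
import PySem

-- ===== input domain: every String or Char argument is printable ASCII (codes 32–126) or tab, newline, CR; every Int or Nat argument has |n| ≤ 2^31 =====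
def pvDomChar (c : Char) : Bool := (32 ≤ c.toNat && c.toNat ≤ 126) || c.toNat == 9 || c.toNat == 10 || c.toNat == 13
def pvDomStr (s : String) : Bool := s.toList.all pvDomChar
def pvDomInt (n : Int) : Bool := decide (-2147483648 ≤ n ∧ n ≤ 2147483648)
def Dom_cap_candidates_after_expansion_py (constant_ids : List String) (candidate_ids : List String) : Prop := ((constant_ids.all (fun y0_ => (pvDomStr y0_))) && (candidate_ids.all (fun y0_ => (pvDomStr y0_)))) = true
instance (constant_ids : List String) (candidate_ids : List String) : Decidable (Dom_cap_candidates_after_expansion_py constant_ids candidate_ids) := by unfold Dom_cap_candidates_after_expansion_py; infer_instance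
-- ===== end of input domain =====

-- B replaces A's filter-plus-append/break loop by one stable sort on the boolean key "not a constant" (constants first, order preserved) plus a count and a single slice (objective: alternative).


-- ===== PORT A =====
-- A's final for-loop with `continue`/`break`: append non-constants to `capped`
-- until len(capped) >= target (= len(kept_constants) + cap_size).
def capA_go (cset : PySem.Set String) (target : Nat) (capped : List String) : List String → List String
  | [] => capped
  | e :: rest =>
    if cset.contains e then capA_go cset target capped rest
    else
      let capped' := capped ++ [e]
      if target ≤ capped'.length then capped' else capA_go cset target capped' rest

def cap_candidates_after_expansion_py (constant_ids : List String) (candidate_ids : List String) : List String :=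
  if candidate_ids.length ≤ 50 then candidate_ids
  else
    let constant_set := PySem.Set.ofList constant_ids
    let kept_constants := candidate_ids.filter (fun e => constant_set.contains e)
    if 50 ≤ kept_constants.length then kept_constants
    else
      let cap_size := 50 - kept_constants.length
      capA_go constant_set (kept_constants.length + cap_size) kept_constants candidate_ids

-- ===== PORT B =====
-- B: stable sort by the boolean key `e not in constant_set` (False < True, ported as 0 < 1),
-- a counting pass for k = number of constant entries, and one slice ordered[:max(k, 50)]
-- (a slice with a nonnegative bound is List.take, exact here).
def cap_candidates_after_expansion_py_alt (constant_ids : List String) (candidate_ids : List String) : List String :=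
  if candidate_ids.length ≤ 50 then candidate_ids
  else
    let constant_set := PySem.Set.ofList constant_ids
    let ordered := PySem.List.sorted candidate_ids (fun e => if constant_set.contains e then (0 : Nat) else 1)
    let k := candidate_ids.foldl (fun acc e => acc + (if constant_set.contains e then 1 else 0)) 0
    ordered.take (max k 50)

-- ===== PRECONDITION & SPEC =====
def Spec_cap_candidates_after_expansion_py (constant_ids : List String) (candidate_ids : List String) (out : List String) : Prop := out = cap_candidates_after_expansion_py_alt constant_ids candidate_ids
instance (constant_ids : List String) (candidate_ids : List String) (out : List String) : Decidable (Spec_cap_candidates_after_expansion_py constant_ids candidate_ids out) := by unfold Spec_cap_candidates_after_expansion_py; infer_instance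

-- ===== CLAIM (what is proved, stated in full; the proofs are below) =====
def Claim_equal_cap_candidates_after_expansion_py : Prop := ∀ (constant_ids : List String) (candidate_ids : List String), Dom_cap_candidates_after_expansion_py constant_ids candidate_ids → Spec_cap_candidates_after_expansion_py constant_ids candidate_ids (cap_candidates_after_expansion_py constant_ids candidate_ids)

-- ===== LEMMAS AND PROOFS =====

-- A's break-loop appends the non-constants of `rest` until length `target`, i.e. a take.
theorem capA_go_eq (cset : PySem.Set String) (target : Nat) :
    ∀ (rest capped : List String), capped.length < target →
      capA_go cset target capped rest
        = capped ++ (rest.filter (fun e => !cset.contains e)).take (target - capped.length) := by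
  intro rest
  induction rest with
  | nil => intro capped _; simp [capA_go]
  | cons e rest ih =>
    intro capped hlt
    by_cases hc : e ∈ cset
    · simp [capA_go, hc, ih capped hlt]
    · by_cases hend : target ≤ (capped ++ [e]).length
      · have hteq : target = capped.length + 1 := by simp at hend; omega
        simp [capA_go, hc, hteq]
      · have hlt' : (capped ++ [e]).length < target := by simp at hend ⊢; omega
        have hrec := ih (capped ++ [e]) hlt'
        have hend2 : ¬ target ≤ capped.length + 1 := by simpa using hend
        have htk : target - capped.length = (target - (capped ++ [e]).length) + 1 := by
          simp at hend ⊢; omega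
        simp [capA_go, hc, hend2, hrec, htk]

-- Inserting a key-1 element when everything present has key 0 or 1: it goes to the end.
theorem insertBy_key1 (key : String → Nat) (x : String) (l : List String)
    (hx : key x = 1) (hl : ∀ y ∈ l, key y ≤ 1) :
    PySem.List.insertBy (fun a b => decide (key a < key b)) x l = l ++ [x] := by
  apply PySem.List.insertBy_of_forall_not_before
  intro y hy
  simp only [decide_eq_false_iff_not, not_lt, hx]
  exact hl y hy

-- Inserting a key-0 element into (zeros ++ ones): it lands between the blocks.
theorem insertBy_key0 (key : String → Nat) (x : String)
    (hx : key x = 0) :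
    ∀ (as bs : List String), (∀ y ∈ as, key y = 0) → (∀ y ∈ bs, key y = 1) →
      PySem.List.insertBy (fun a b => decide (key a < key b)) x (as ++ bs)
        = (as ++ [x]) ++ bs := by
  intro as
  induction as with
  | nil =>
    intro bs _ hbs
    cases bs with
    | nil => simp [PySem.List.insertBy]
    | cons b bs =>
      have hb : key b = 1 := hbs b (by simp)
      simp [PySem.List.insertBy, hx, hb]
  | cons a as ih =>
    intro bs has hbs
    have ha : key a = 0 := has a (by simp)
    have : ¬ key x < key a := by omega
    simp only [List.cons_append, PySem.List.insertBy, decide_eq_true_eq, this, if_false]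
    rw [ih bs (fun y hy => has y (by simp [hy])) hbs]

-- The stable sort on a 0/1 key is the zero-key elements followed by the one-key elements.
theorem sorted_bool_key (key : String → Nat) (hk : ∀ e, key e = 0 ∨ key e = 1)
    (xs : List String) :
    PySem.List.sorted xs key
      = xs.filter (fun e => key e == 0) ++ xs.filter (fun e => !(key e == 0)) := by
  rw [PySem.List.sorted_eq_foldl_insertBy]
  have main : ∀ (l as bs : List String), (∀ y ∈ as, key y = 0) → (∀ y ∈ bs, key y = 1) →
      l.foldl (fun acc x => PySem.List.insertBy (fun a b => decide (key a < key b)) x acc) (as ++ bs)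
        = (as ++ l.filter (fun e => key e == 0)) ++ (bs ++ l.filter (fun e => !(key e == 0))) := by
    intro l
    induction l with
    | nil => simp
    | cons x l ih =>
      intro as bs has hbs
      rcases hk x with hx | hx
      · rw [List.foldl_cons, insertBy_key0 key x hx as bs has hbs,
            ih (as ++ [x]) bs (by intro y hy; rcases List.mem_append.1 hy with h | h
                                  · exact has y h
                                  · simp at h; simpa [h] using hx) hbs]
        simp [hx, List.append_assoc]
      · rw [List.foldl_cons]
        rw [insertBy_key1 key x (as ++ bs) hx]
        · rw [List.append_assoc,
              ih as (bs ++ [x]) has (by intro y hy; rcases List.mem_append.1 hy with h | h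
                                        · exact hbs y h
                                        · simp at h; simpa [h] using hx)]
          simp [hx, List.append_assoc]
        · intro y hy
          rcases List.mem_append.1 hy with h | h
          · have := has y h; omega
          · exact le_of_eq (hbs y h)
  simpa using main xs [] []

-- The counting fold is the length of the filter.
theorem count_fold_eq (cset : PySem.Set String) (xs : List String) :
    xs.foldl (fun acc e => acc + (if cset.contains e then 1 else 0)) 0
      = (xs.filter (fun e => cset.contains e)).length := by
  have h : ∀ (xs : List String) (n : Nat),
      xs.foldl (fun acc e => acc + (if cset.contains e then 1 else 0)) n
        = n + (xs.filter (fun e => cset.contains e)).length := by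
    intro xs
    induction xs with
    | nil => simp
    | cons e xs ih =>
      intro n
      rw [List.foldl_cons, ih, List.filter_cons]
      by_cases hc : e ∈ cset <;> simp [hc, PySem.Set.contains]
      omega
  simpa using h xs 0

-- ===== VERDICT (by name: the statement is the Claim_ definition above) =====
theorem cap_candidates_after_expansion_py_spec : Claim_equal_cap_candidates_after_expansion_py := by
  intro constant_ids candidate_ids _
  unfold Spec_cap_candidates_after_expansion_py
  unfold cap_candidates_after_expansion_py cap_candidates_after_expansion_py_alt
  by_cases h1 : candidate_ids.length ≤ 50
  · simp [h1]
  · simp only [h1, if_false]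
    set cset := PySem.Set.ofList constant_ids
    have hkey : ∀ e : String, (if cset.contains e then (0:Nat) else 1) = 0
        ∨ (if cset.contains e then (0:Nat) else 1) = 1 := by
      intro e; by_cases h : e ∈ cset <;> simp [h, PySem.Set.contains]
    rw [sorted_bool_key _ hkey, count_fold_eq]
    have hfe : (fun e => (if cset.contains e then (0:Nat) else 1) == 0) = fun e => cset.contains e := by
      funext e; by_cases h : e ∈ cset <;> simp [h, PySem.Set.contains]
    have hfne : (fun e => !((if cset.contains e then (0:Nat) else 1) == 0)) = fun e => !cset.contains e := by
      funext e; by_cases h : e ∈ cset <;> simp [h, PySem.Set.contains]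
    rw [hfe, hfne]
    set kept := candidate_ids.filter (fun e => cset.contains e) with hkept
    by_cases h2 : 50 ≤ kept.length
    · have hmax : max kept.length 50 = kept.length := by omega
      simp only [h2, if_true, hmax]
      rw [show kept.length = kept.length + 0 from rfl, List.take_append]
      simp
    · simp only [h2, if_false]
      have hmax : max kept.length 50 = kept.length + (50 - kept.length) := by omega
      have hlt : kept.length < kept.length + (50 - kept.length) := by omega
      have hk : List.take (kept.length + (50 - kept.length)) kept = kept :=
        List.take_of_length_le (by omega)
      rw [capA_go_eq cset _ candidate_ids kept hlt, hmax, List.take_append,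
          Nat.add_sub_cancel_left, hk]
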